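-- pv_equiv track=rewrite | github.com/sanjanarajesh-ctrl/OFAC_FIX_Sanctions_Screener | model.py | parse_fix_message_nlp
-- ===== SOURCE A (Python) =====
-- def parse_fix_message_nlp(fix_message):
--     fields = fix_message.split('|')
--     parsed_fields = {}
--     for field in fields:
--         if '=' in field:
--             tag, value = field.split('=', 1)
--             parsed_fields[tag] = value
--     return parsed_fields
-- ===== SOURCE B (Python) =====
-- def parse_fix_message_nlp(fix_message):
--     # Single character scan: build tag/value in place, no split calls.
--     parsed = {}
--     tag, value, has_eq = [], [], False
--     for ch in fix_message:
--         if ch == '|':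
--             if has_eq:
--                 parsed[''.join(tag)] = ''.join(value)
--             tag, value, has_eq = [], [], False
--         elif ch == '=' and not has_eq:
--             has_eq = True
--         elif has_eq:
--             value.append(ch)
--         else:
--             tag.append(ch)
--     if has_eq:
--         parsed[''.join(tag)] = ''.join(value)
--     return parsed
-- ===== Notes on version B (the rewrite author's own statement) =====
-- stated objective: alternative
-- what changed: A splits the message on '|' and then re-splits every field on '=', building intermediate field lists; B makes a single character-at-a-time scan with tag/value accumulators and a has_eq flag, inserting each pair as its terminator is reached, with no split calls or intermediate lists.
import Mathlib
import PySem

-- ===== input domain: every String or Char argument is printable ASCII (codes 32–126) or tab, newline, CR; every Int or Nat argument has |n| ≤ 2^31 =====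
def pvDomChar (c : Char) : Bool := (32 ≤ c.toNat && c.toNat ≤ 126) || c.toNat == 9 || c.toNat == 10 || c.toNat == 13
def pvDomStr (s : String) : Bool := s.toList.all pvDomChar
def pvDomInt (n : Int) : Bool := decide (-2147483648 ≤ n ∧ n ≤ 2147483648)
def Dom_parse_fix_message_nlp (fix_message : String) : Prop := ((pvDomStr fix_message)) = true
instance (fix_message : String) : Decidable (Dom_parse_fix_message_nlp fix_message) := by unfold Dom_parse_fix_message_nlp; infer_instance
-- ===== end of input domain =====

-- B replaces A's split-then-split with a single character-at-a-time scan that builds each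
-- tag/value in place (objective: alternative — one pass, no intermediate field lists).

-- ===== PORT A =====
def parse_fix_message_nlp (fix_message : String) : List (String × String) :=
  -- fields = fix_message.split('|')   (split? is `some` since the separator "|" is nonempty)
  -- for field in fields: if '=' in field: tag, value = field.split('=', 1); parsed_fields[tag] = value
  (((PySem.Str.split? fix_message "|").getD []).foldl (fun (d : PySem.Dict String String) field =>
    if PySem.Str.isIn "=" field then
      match PySem.Str.splitMax? field "=" 1 with
      | some [tag, value] => d.insert tag value
      | _ => d
    else d) PySem.Dict.empty).items

-- ===== PORT B =====
-- the scan loop of Source B: tag/value accumulators, has_eq flag, dict built as we go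
def pvAltScan : List Char → PySem.Dict String String → List Char → List Char → Bool →
    PySem.Dict String String
  | [], d, tag, val, hasEq =>
    if hasEq then d.insert (String.ofList tag) (String.ofList val) else d
  | c :: cs, d, tag, val, hasEq =>
    if c = '|' then
      pvAltScan cs (if hasEq then d.insert (String.ofList tag) (String.ofList val) else d) [] [] false
    else if c = '=' ∧ hasEq = false then
      pvAltScan cs d tag val true
    else if hasEq then
      pvAltScan cs d tag (val ++ [c]) hasEq
    else
      pvAltScan cs d (tag ++ [c]) val hasEq

def parse_fix_message_nlp_alt (fix_message : String) : List (String × String) :=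
  (pvAltScan fix_message.toList PySem.Dict.empty [] [] false).items

-- ===== PRECONDITION & SPEC =====
def Spec_parse_fix_message_nlp (fix_message : String) (out : List (String × String)) : Prop := out = parse_fix_message_nlp_alt fix_message
instance (fix_message : String) (out : List (String × String)) : Decidable (Spec_parse_fix_message_nlp fix_message out) := by unfold Spec_parse_fix_message_nlp; infer_instance

-- ===== CLAIM (what is proved, stated in full; the proofs are below) =====
def Claim_equal_parse_fix_message_nlp : Prop := ∀ (fix_message : String), Dom_parse_fix_message_nlp fix_message → Spec_parse_fix_message_nlp fix_message (parse_fix_message_nlp fix_message)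

-- ===== LEMMAS AND PROOFS =====

-- proof-side model of s.split('|') with the current (in-order) partial field `pre`
def pvSplitBar : List Char → List Char → List (List Char)
  | [], pre => [pre]
  | c :: cs, pre => if c = '|' then pre :: pvSplitBar cs [] else pvSplitBar cs (pre ++ [c])

-- proof-side model of f.split('=', 1) with the current (in-order) partial first piece `pre`
def pvSplitEq : List Char → List Char → List (List Char)
  | [], pre => [pre]
  | c :: cs, pre => if c = '=' then [pre, cs] else pvSplitEq cs (pre ++ [c])

-- proof-side model of A's per-field action
def pvProcF (d : PySem.Dict String String) (f : List Char) : PySem.Dict String String :=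
  match pvSplitEq f [] with
  | [t, v] => d.insert (String.ofList t) (String.ofList v)
  | _ => d

theorem pv_go_bar : ∀ (fuel : Nat) (l cur : List Char) (acc : List (List Char)),
    l.length ≤ fuel →
    PySem.Chars.splitOn.go ['|'] fuel l cur acc = acc.reverse ++ pvSplitBar l cur.reverse := by
  intro fuel
  induction fuel with
  | zero =>
    intro l cur acc h
    have : l = [] := List.length_eq_zero_iff.mp (Nat.le_zero.mp h)
    subst this
    simp [PySem.Chars.splitOn.go, pvSplitBar]
  | succ n ih =>
    intro l cur acc h
    cases l with
    | nil => simp [PySem.Chars.splitOn.go, pvSplitBar]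
    | cons c cs =>
      simp only [PySem.Chars.splitOn.go]
      by_cases hc : c = '|'
      · subst hc
        have : List.isPrefixOf ['|'] ('|' :: cs) = true := by
          simp [List.isPrefixOf]
        rw [if_pos this]
        simp only [List.length, List.drop_succ_cons, List.drop_zero] at *
        rw [ih cs [] (cur.reverse :: acc) (by omega)]
        simp [pvSplitBar]
      · have : List.isPrefixOf ['|'] (c :: cs) = false := by
          simp [List.isPrefixOf]
          intro h'; exact absurd h'.symm hc
        rw [if_neg (by simp [this])]
        rw [ih cs (c :: cur) acc (by simpa using Nat.le_of_succ_le_succ h)]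
        simp [pvSplitBar, hc]

theorem pv_go_eq_zero : ∀ (fuel : Nat) (l : List Char) (acc : List (List Char)),
    PySem.Chars.splitOnMax.go ['='] fuel 0 l [] acc = acc.reverse ++ [l] := by
  intro fuel l acc
  cases fuel with
  | zero => simp [PySem.Chars.splitOnMax.go]
  | succ n =>
    cases l with
    | nil => simp [PySem.Chars.splitOnMax.go]
    | cons c cs => simp [PySem.Chars.splitOnMax.go]

theorem pv_go_eq : ∀ (fuel : Nat) (l cur : List Char) (acc : List (List Char)),
    l.length ≤ fuel →
    PySem.Chars.splitOnMax.go ['='] fuel 1 l cur acc = acc.reverse ++ pvSplitEq l cur.reverse := by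
  intro fuel
  induction fuel with
  | zero =>
    intro l cur acc h
    have : l = [] := List.length_eq_zero_iff.mp (Nat.le_zero.mp h)
    subst this
    simp [PySem.Chars.splitOnMax.go, pvSplitEq]
  | succ n ih =>
    intro l cur acc h
    cases l with
    | nil => simp [PySem.Chars.splitOnMax.go, pvSplitEq]
    | cons c cs =>
      simp only [PySem.Chars.splitOnMax.go]
      by_cases hc : c = '='
      · subst hc
        have hp : List.isPrefixOf ['='] ('=' :: cs) = true := by simp [List.isPrefixOf]
        rw [if_neg (by omega), if_pos hp]
        simp only [List.length, List.drop_succ_cons, List.drop_zero]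
        rw [pv_go_eq_zero]
        simp [pvSplitEq]
      · have hp : List.isPrefixOf ['='] (c :: cs) = false := by
          simp [List.isPrefixOf]
          intro h'; exact absurd h'.symm hc
        rw [if_neg (by omega), if_neg (by simp [hp])]
        rw [ih cs (c :: cur) acc (by simpa using Nat.le_of_succ_le_succ h)]
        simp [pvSplitEq, hc]

theorem pvSplitEq_no_eq : ∀ (l pre : List Char), '=' ∉ l → pvSplitEq l pre = [pre ++ l] := by
  intro l
  induction l with
  | nil => intro pre _; simp [pvSplitEq]
  | cons c cs ih =>
    intro pre h
    have hc : c ≠ '=' := fun hc => h (by simp [hc])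
    simp only [pvSplitEq, if_neg hc]
    rw [ih (pre ++ [c]) (fun hm => h (by simp [hm]))]
    simp

theorem pvSplitEq_split : ∀ (t pre v : List Char), '=' ∉ t →
    pvSplitEq (t ++ '=' :: v) pre = [pre ++ t, v] := by
  intro t
  induction t with
  | nil => intro pre v _; simp [pvSplitEq]
  | cons c cs ih =>
    intro pre v h
    have hc : c ≠ '=' := fun hc => h (by simp [hc])
    simp only [List.cons_append, pvSplitEq, if_neg hc]
    rw [ih (pre ++ [c]) v (fun hm => h (by simp [hm]))]
    simp

theorem pvSplitEq_two_of_mem : ∀ (l pre : List Char), '=' ∈ l →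
    ∃ a b, pvSplitEq l pre = [a, b] := by
  intro l
  induction l with
  | nil => intro pre h; simp at h
  | cons c cs ih =>
    intro pre h
    by_cases hc : c = '='
    · exact ⟨pre, cs, by simp [pvSplitEq, hc]⟩
    · have : '=' ∈ cs := by
        rcases List.mem_cons.mp h with h1 | h1
        · exact absurd h1.symm hc
        · exact h1
      obtain ⟨a, b, hab⟩ := ih (pre ++ [c]) this
      exact ⟨a, b, by simp [pvSplitEq, hc, hab]⟩

-- '=' in f  ↔  Chars.isIn ['='] f
theorem pv_isIn_eq (f : List Char) : PySem.Chars.isIn ['='] f = true ↔ '=' ∈ f := by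
  rw [PySem.Chars.isIn_iff_infix]
  constructor
  · intro h; exact h.mem (by simp)
  · intro h
    obtain ⟨s, t, rfl⟩ := List.append_of_mem h
    exact ⟨s, t, by simp⟩

-- A's loop body, applied to the string of a field, is pvProcF
theorem pv_step_eq (d : PySem.Dict String String) (f : List Char) :
    (if PySem.Str.isIn "=" (String.ofList f) then
        match PySem.Str.splitMax? (String.ofList f) "=" 1 with
        | some [tag, value] => d.insert tag value
        | _ => d
      else d) = pvProcF d f := by
  have hIsIn : PySem.Str.isIn "=" (String.ofList f) = PySem.Chars.isIn ['='] f := by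
    simp [PySem.Str.isIn]
  by_cases h : '=' ∈ f
  · rw [hIsIn, if_pos ((pv_isIn_eq f).mpr h)]
    have hsplit : PySem.Chars.splitMax? f ['='] 1 = some (pvSplitEq f []) := by
      simp only [PySem.Chars.splitMax?, PySem.Chars.splitOnMax]
      rw [if_neg (by decide), if_neg (by omega)]
      have := pv_go_eq (f.length + 1) f [] [] (by omega)
      simpa using this
    have : PySem.Str.splitMax? (String.ofList f) "=" 1 =
        some ((pvSplitEq f []).map String.ofList) := by
      simp [PySem.Str.splitMax?, hsplit]
    rw [this]
    obtain ⟨a, b, hab⟩ := pvSplitEq_two_of_mem f [] h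
    simp [hab, pvProcF]
  · rw [hIsIn, if_neg (by simp [pv_isIn_eq f, h])]
    simp [pvProcF, pvSplitEq_no_eq f [] h]

-- the scan agrees with folding A's per-field action over the remaining fields
theorem pv_scan_spec : ∀ (cs : List Char) (d : PySem.Dict String String)
    (tag val : List Char), '=' ∉ tag →
    (pvAltScan cs d tag [] false = (pvSplitBar cs tag).foldl pvProcF d) ∧
    (pvAltScan cs d tag val true = (pvSplitBar cs (tag ++ '=' :: val)).foldl pvProcF d) := by
  intro cs
  induction cs with
  | nil =>
    intro d tag val htag
    constructor
    · simp [pvAltScan, pvSplitBar, pvProcF, pvSplitEq_no_eq tag [] htag]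
    · simp [pvAltScan, pvSplitBar, pvProcF, pvSplitEq_split tag [] val htag]
  | cons c cs ih =>
    intro d tag val htag
    constructor
    · by_cases hbar : c = '|'
      · subst hbar
        have hproc : pvProcF d tag = d := by
          simp [pvProcF, pvSplitEq_no_eq tag [] htag]
        simp [pvAltScan, pvSplitBar, hproc]
        exact (ih d [] [] (by simp)).1
      · by_cases heq : c = '='
        · subst heq
          simp [pvAltScan, pvSplitBar]
          simpa using (ih d tag [] htag).2
        · simp [pvAltScan, pvSplitBar, hbar, heq]
          exact (ih d (tag ++ [c]) [] (by simp [htag, Ne.symm heq])).1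
    · by_cases hbar : c = '|'
      · subst hbar
        have hproc : pvProcF d (tag ++ '=' :: val) =
            d.insert (String.ofList tag) (String.ofList val) := by
          simp [pvProcF, pvSplitEq_split tag [] val htag]
        simp [pvAltScan, pvSplitBar, hproc]
        exact (ih (d.insert (String.ofList tag) (String.ofList val)) [] [] (by simp)).1
      · simp [pvAltScan, pvSplitBar, hbar]
        simpa using (ih d tag (val ++ [c]) htag).2

-- A's whole fold equals the fold of pvProcF
theorem pv_foldl_eq : ∀ (l : List (List Char)) (d : PySem.Dict String String),
    l.foldl (fun d f =>
      if PySem.Str.isIn "=" (String.ofList f) then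
        match PySem.Str.splitMax? (String.ofList f) "=" 1 with
        | some [tag, value] => d.insert tag value
        | _ => d
      else d) d = l.foldl pvProcF d := by
  intro l
  induction l with
  | nil => intro d; rfl
  | cons f fs ih =>
    intro d
    simp only [List.foldl_cons]
    rw [pv_step_eq]
    exact ih _

-- ===== VERDICT (by name: the statement is the Claim_ definition above) =====
theorem parse_fix_message_nlp_spec : Claim_equal_parse_fix_message_nlp := by
  intro s _
  unfold Spec_parse_fix_message_nlp parse_fix_message_nlp parse_fix_message_nlp_alt
  have hsplit : PySem.Str.split? s "|" = some ((pvSplitBar s.toList []).map String.ofList) := by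
    simp only [PySem.Str.split?, PySem.Chars.split?]
    have hbl : "|".toList = ['|'] := by decide
    rw [hbl, if_neg (by decide)]
    simp only [PySem.Chars.splitOn]
    rw [pv_go_bar (s.toList.length + 1) s.toList [] [] (by omega)]
    simp
  rw [hsplit, Option.getD_some, List.foldl_map,
    (pv_scan_spec s.toList PySem.Dict.empty [] [] (by simp)).1]
  exact congrArg PySem.Dict.items (pv_foldl_eq (pvSplitBar s.toList []) PySem.Dict.empty)
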